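-- pv_equiv track=rewrite | github.com/RoniAUB/Oud_LM | Tokenization.py | build_token_sequences
-- ===== SOURCE A (Python) =====
-- def build_token_sequences(type_tokens, freq_tokens, dur_tokens, target_length=None, pad_token=0, eos_token=None):
--     assert len(type_tokens) == len(freq_tokens) == len(dur_tokens), "Input lists must have the same length"
--     token_sequences = []
--
--     for t, freqs, durs in zip(type_tokens, freq_tokens, dur_tokens):
--         assert len(freqs) == len(durs), "Frequency and duration lists must be same length"
--
--         pair_token_count = 2
--         max_pairs_per_seq = None
--         if target_length is not None:
--             assert target_length >= 2 + pair_token_count, "Target length too small"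
--             max_pairs_per_seq = (target_length - 2) // pair_token_count
--
--         i = 0
--         while i < len(freqs):
--             seq = [t]
--             end = i + max_pairs_per_seq if max_pairs_per_seq else len(freqs)
--             for f, d in zip(freqs[i:end], durs[i:end]):
--                 seq.extend([f, d])
--             i = end
--
--             if eos_token is not None:
--                 seq.append(eos_token)
--
--             if target_length is not None and len(seq) < target_length:
--                 seq += [pad_token] * (target_length - len(seq))
--
--             token_sequences.append(seq)
--
--     return token_sequences
-- ===== SOURCE B (Python) =====
-- def build_token_sequences(type_tokens, freq_tokens, dur_tokens, target_length=None, pad_token=0, eos_token=None):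
--     assert len(type_tokens) == len(freq_tokens) == len(dur_tokens), "Input lists must have the same length"
--     out = []
--     for t, freqs, durs in zip(type_tokens, freq_tokens, dur_tokens):
--         assert len(freqs) == len(durs), "Frequency and duration lists must be same length"
--         # interleave the whole item once, then cut it into fixed-width windows
--         flat = [x for fd in zip(freqs, durs) for x in fd]
--         if target_length is None:
--             windows = [flat] if flat else []
--         else:
--             assert target_length >= 4, "Target length too small"
--             w = 2 * ((target_length - 2) // 2)
--             windows = [flat[j:j + w] for j in range(0, len(flat), w)]
--         for chunk in windows:
--             seq = [t] + chunk
--             if eos_token is not None: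
--                 seq.append(eos_token)
--             if target_length is not None and len(seq) < target_length:
--                 seq += [pad_token] * (target_length - len(seq))
--             out.append(seq)
--     return out
-- ===== Notes on version B (the rewrite author's own statement) =====
-- stated objective: alternative
-- what changed: B interleaves each item's (freq, dur) pairs into one flat token list up front and cuts it into fixed-width windows by slicing over a stride range, instead of A's index-stepping while loop that slices freqs and durs separately and re-zips per window; Pre_ excludes only the inputs where A raises AssertionError (mismatched lengths, or target_length < 4 with a nonempty item list).
import Mathlib
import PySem

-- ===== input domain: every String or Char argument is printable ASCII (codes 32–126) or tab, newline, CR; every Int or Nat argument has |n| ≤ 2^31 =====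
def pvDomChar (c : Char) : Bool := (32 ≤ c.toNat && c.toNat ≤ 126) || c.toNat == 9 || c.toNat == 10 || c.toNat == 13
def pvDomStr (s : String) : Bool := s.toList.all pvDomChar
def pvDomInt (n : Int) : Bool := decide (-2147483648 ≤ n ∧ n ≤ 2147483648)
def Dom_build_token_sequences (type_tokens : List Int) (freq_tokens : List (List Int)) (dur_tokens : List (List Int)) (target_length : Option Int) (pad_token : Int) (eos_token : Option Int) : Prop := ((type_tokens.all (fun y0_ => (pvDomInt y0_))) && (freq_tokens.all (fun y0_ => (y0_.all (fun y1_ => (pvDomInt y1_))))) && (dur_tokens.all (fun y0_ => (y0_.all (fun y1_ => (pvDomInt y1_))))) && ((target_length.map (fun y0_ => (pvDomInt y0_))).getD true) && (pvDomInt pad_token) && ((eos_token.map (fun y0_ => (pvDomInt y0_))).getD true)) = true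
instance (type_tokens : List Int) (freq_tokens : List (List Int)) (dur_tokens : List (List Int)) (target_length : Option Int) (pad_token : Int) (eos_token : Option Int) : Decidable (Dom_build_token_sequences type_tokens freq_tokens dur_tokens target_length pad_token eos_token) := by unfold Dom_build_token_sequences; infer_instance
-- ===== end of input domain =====

-- B interleaves each item's (freq, dur) pairs into one flat list ONCE and cuts it into fixed-width
-- windows by slicing, instead of A's index-stepping while loop that re-zips a pair of slices per
-- window (objective: alternative decomposition, same cost; return value only, no mutation).

-- ===== PORT A =====
-- one item's while loop; fuel = freqs.length + 1 bounds the number of iterations under Pre_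
def pvAItemLoop (t : Int) (freqs durs : List Int) (maxP : Option Int) (tl : Option Int)
    (pad : Int) (eos : Option Int) : Nat → Int → List (List Int) → List (List Int)
  | 0, _, acc => acc
  | Nat.succ fuel, i, acc =>
    if i < (freqs.length : Int) then
      -- end = i + max_pairs_per_seq if max_pairs_per_seq else len(freqs)
      let endI : Int := match maxP with
        | some m => if m ≠ 0 then i + m else (freqs.length : Int)
        | none => (freqs.length : Int)
      -- for f, d in zip(freqs[i:end], durs[i:end]): seq.extend([f, d])
      let pairs := (PySem.List.slice freqs (some i) (some endI)).zip
                   (PySem.List.slice durs (some i) (some endI))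
      let seq := pairs.foldl (fun s fd => s ++ [fd.1, fd.2]) [t]
      let seq2 := match eos with
        | some e => seq ++ [e]
        | none => seq
      let seq3 := match tl with
        | some L => if (seq2.length : Int) < L
                    then seq2 ++ List.replicate (L - (seq2.length : Int)).toNat pad
                    else seq2
        | none => seq2
      pvAItemLoop t freqs durs maxP tl pad eos fuel endI (acc ++ [seq3])
    else acc

def build_token_sequences (type_tokens : List Int) (freq_tokens : List (List Int)) (dur_tokens : List (List Int)) (target_length : Option Int) (pad_token : Int) (eos_token : Option Int) : List (List Int) :=
  (type_tokens.zip (freq_tokens.zip dur_tokens)).foldl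
    (fun acc it =>
      let t := it.1
      let freqs := it.2.1
      let durs := it.2.2
      let maxP : Option Int := match target_length with
        | some L => some (PySem.Int.floordiv (L - 2) 2)
        | none => none
      pvAItemLoop t freqs durs maxP target_length pad_token eos_token (freqs.length + 1) 0 acc)
    []

-- ===== PORT B =====
def build_token_sequences_alt (type_tokens : List Int) (freq_tokens : List (List Int)) (dur_tokens : List (List Int)) (target_length : Option Int) (pad_token : Int) (eos_token : Option Int) : List (List Int) :=
  (type_tokens.zip (freq_tokens.zip dur_tokens)).foldl
    (fun out it =>
      let t := it.1
      let freqs := it.2.1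
      let durs := it.2.2
      -- flat = [x for fd in zip(freqs, durs) for x in fd]
      let flat := (freqs.zip durs).flatMap (fun fd => [fd.1, fd.2])
      let windows : List (List Int) := match target_length with
        | none => if flat ≠ [] then [flat] else []
        | some L =>
          let w : Int := 2 * PySem.Int.floordiv (L - 2) 2
          (PySem.List.pyRange 0 (flat.length : Int) w).map
            (fun j => PySem.List.slice flat (some j) (some (j + w)))
      windows.foldl
        (fun out chunk =>
          let seq := [t] ++ chunk
          let seq2 := match eos_token with
            | some e => seq ++ [e]
            | none => seq
          let seq3 := match target_length with
            | some L => if (seq2.length : Int) < L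
                        then seq2 ++ List.replicate (L - (seq2.length : Int)).toNat pad_token
                        else seq2
            | none => seq2
          out ++ [seq3])
        out)
    []

-- ===== PRECONDITION & SPEC =====
-- Pre_ excludes exactly the inputs where A raises AssertionError: mismatched outer lengths,
-- a mismatched freqs/durs pair, or target_length < 4 with at least one item to process.
def Pre_build_token_sequences (type_tokens : List Int) (freq_tokens : List (List Int)) (dur_tokens : List (List Int)) (target_length : Option Int) (pad_token : Int) (eos_token : Option Int) : Prop :=
  type_tokens.length = freq_tokens.length ∧ freq_tokens.length = dur_tokens.length ∧
  (freq_tokens.zip dur_tokens).all (fun p => p.1.length == p.2.length) = true ∧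
  (freq_tokens = [] ∨ 4 ≤ target_length.getD 4)
instance (type_tokens : List Int) (freq_tokens : List (List Int)) (dur_tokens : List (List Int)) (target_length : Option Int) (pad_token : Int) (eos_token : Option Int) : Decidable (Pre_build_token_sequences type_tokens freq_tokens dur_tokens target_length pad_token eos_token) := by unfold Pre_build_token_sequences; infer_instance

def pvWitness_build_token_sequences : List Int × List (List Int) × List (List Int) × Option Int × Int × Option Int :=
  ([7, 8], [[1, 2, 3], []], [[4, 5, 6], []], some 6, 0, some 99)

def Spec_build_token_sequences (type_tokens : List Int) (freq_tokens : List (List Int)) (dur_tokens : List (List Int)) (target_length : Option Int) (pad_token : Int) (eos_token : Option Int) (out : List (List Int)) : Prop := out = build_token_sequences_alt type_tokens freq_tokens dur_tokens target_length pad_token eos_token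
instance (type_tokens : List Int) (freq_tokens : List (List Int)) (dur_tokens : List (List Int)) (target_length : Option Int) (pad_token : Int) (eos_token : Option Int) (out : List (List Int)) : Decidable (Spec_build_token_sequences type_tokens freq_tokens dur_tokens target_length pad_token eos_token out) := by unfold Spec_build_token_sequences; infer_instance

-- ===== CLAIM (what is proved, stated in full; the proofs are below) =====
def Claim_equal_build_token_sequences : Prop := ∀ (type_tokens : List Int) (freq_tokens : List (List Int)) (dur_tokens : List (List Int)) (target_length : Option Int) (pad_token : Int) (eos_token : Option Int), Dom_build_token_sequences type_tokens freq_tokens dur_tokens target_length pad_token eos_token → Pre_build_token_sequences type_tokens freq_tokens dur_tokens target_length pad_token eos_token → Spec_build_token_sequences type_tokens freq_tokens dur_tokens target_length pad_token eos_token (build_token_sequences type_tokens freq_tokens dur_tokens target_length pad_token eos_token)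

-- ===== LEMMAS AND PROOFS =====

-- canonical chunking: consecutive windows of wm1+1 elements
def pvChunks {α : Type} (wm1 : Nat) : List α → List (List α)
  | [] => []
  | x :: xs => ((x :: xs).take (wm1 + 1)) :: pvChunks wm1 (xs.drop wm1)
  termination_by l => l.length
  decreasing_by simp
-- ---- general range lemmas (not in the PySem book) ----
lemma pvRange_pos_nil (a b s : Int) (hs : 0 < s) (hab : b ≤ a) :
    PySem.List.pyRange a b s = [] := by
  rw [PySem.List.pyRange_of_pos a b hs]
  simp [show ¬ a < b by omega]

lemma pvRange_pos_cons (a b s : Int) (hs : 0 < s) (hab : a < b) :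
    PySem.List.pyRange a b s = a :: PySem.List.pyRange (a + s) b s := by
  rw [PySem.List.pyRange_of_pos a b hs, PySem.List.pyRange_of_pos (a + s) b hs]
  have h1 : (b - a + s - 1) / s = (b - a - 1) / s + 1 := by
    rw [show b - a + s - 1 = (b - a - 1) + 1 * s by ring,
        Int.add_mul_ediv_right _ _ (by omega : s ≠ 0)]
  by_cases hc : a + s < b
  · have h2 : b - (a + s) + s - 1 = b - a - 1 := by ring
    have hq : 0 ≤ (b - a - 1) / s := Int.ediv_nonneg (by omega) (by omega)
    rw [if_pos hab, if_pos hc, h1, h2, Int.toNat_add hq (by omega)]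
    simp only [Int.toNat_one, List.range_succ_eq_map]
    simp [List.map_map, Function.comp, mul_add]
    ring_nf
    exact fun _ _ => trivial
  · have h0 : (b - a - 1) / s = 0 := Int.ediv_eq_zero_of_lt (by omega) (by omega)
    rw [if_pos hab, if_neg hc, h1, h0]
    simp

-- ---- flat-window ↔ chunk correspondence ----
lemma pvWindows_shift (W : Nat) (hW : 0 < W) (flat : List Int) :
    (PySem.List.pyRange (W : Int) (flat.length : Int) (W : Int)).map
      (fun j => PySem.List.slice flat (some j) (some (j + (W : Int))))
    = (PySem.List.pyRange 0 ((flat.drop W).length : Int) (W : Int)).map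
      (fun j => PySem.List.slice (flat.drop W) (some j) (some (j + (W : Int)))) := by
  have hWi : (0 : Int) < (W : Int) := by exact_mod_cast hW
  rw [PySem.List.pyRange_of_pos _ _ hWi, PySem.List.pyRange_of_pos _ _ hWi]
  by_cases hc : (W : Int) < (flat.length : Int)
  · have hlen : ((flat.drop W).length : Int) = (flat.length : Int) - W := by
      simp [List.length_drop]; omega
    have hcount : (((flat.length : Int) - W + W - 1) / W).toNat
        = ((((flat.drop W).length : Int) - 0 + W - 1) / W).toNat := by
      rw [hlen]; ring_nf
    rw [if_pos hc, if_pos (by rw [hlen]; omega), ← hcount]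
    rw [List.map_map, List.map_map]
    apply List.map_congr_left
    intro k _
    simp only [Function.comp]
    have e1 : (W : Int) + (W : Int) * (k : Int) = ((W + W * k : Nat) : Int) := by push_cast; ring
    have e2 : (0 : Int) + (W : Int) * (k : Int) = ((W * k : Nat) : Int) := by push_cast; ring
    rw [e1, e2, PySem.List.slice_natCast_add, PySem.List.slice_natCast_add,
        List.drop_drop]
  · rw [if_neg hc, if_neg (by simp [List.length_drop]; omega)]
    simp
lemma pvWindows_eq_chunks (W : Nat) (hW : 0 < W) (flat : List Int) :
    (PySem.List.pyRange 0 (flat.length : Int) (W : Int)).map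
      (fun j => PySem.List.slice flat (some j) (some (j + (W : Int))))
    = pvChunks (W - 1) flat := by
  have hWi : (0 : Int) < (W : Int) := by exact_mod_cast hW
  induction hn : flat.length using Nat.strong_induction_on generalizing flat with
  | _ n ih =>
    match flat with
    | [] =>
      subst hn
      simp [pvRange_pos_nil 0 0 _ hWi le_rfl, pvChunks]
    | x :: xs =>
      subst hn
      have hpos : (0 : Int) < ((x :: xs).length : Int) := by
        exact_mod_cast Nat.succ_pos xs.length
      rw [pvRange_pos_cons 0 _ _ hWi hpos]
      rw [List.map_cons]
      simp only [zero_add]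
      rw [pvWindows_shift W hW (x :: xs)]
      have hrec := ih ((x :: xs).drop W).length (by simp; omega) ((x :: xs).drop W) rfl
      rw [hrec]
      show _ = pvChunks (W - 1) (x :: xs)
      conv_rhs => rw [pvChunks]
      congr 1
      · have e0 : (0 : Int) + (W : Int) = ((0 + W : Nat) : Int) := by push_cast; ring
        have : PySem.List.slice (x :: xs) (some ((0:Nat) : Int)) (some (((0:Nat) : Int) + (W : Int)))
            = ((x :: xs).drop 0).take W := by
          rw [PySem.List.slice_natCast_add]
        simp only [List.drop_zero] at this
        rw [Nat.sub_add_cancel hW]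
        simp
      · congr 1
        show (x :: xs).drop W = xs.drop (W - 1)
        cases W with
        | zero => omega
        | succ k => simp
-- ---- interleaving commutes with take/drop/chunking ----
lemma pvFlat_take (ps : List (Int × Int)) (k : Nat) :
    (ps.flatMap (fun fd => [fd.1, fd.2])).take (2 * k)
    = (ps.take k).flatMap (fun fd => [fd.1, fd.2]) := by
  induction ps generalizing k with
  | nil => simp
  | cons p rest ih =>
    cases k with
    | zero => simp
    | succ k' =>
      simp only [List.flatMap_cons, List.take_succ_cons]
      rw [show 2 * (k' + 1) = (2 * k') + 1 + 1 by ring]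
      simp [ih]

lemma pvFlat_drop (ps : List (Int × Int)) (k : Nat) :
    (ps.flatMap (fun fd => [fd.1, fd.2])).drop (2 * k)
    = (ps.drop k).flatMap (fun fd => [fd.1, fd.2]) := by
  induction ps generalizing k with
  | nil => simp
  | cons p rest ih =>
    cases k with
    | zero => simp
    | succ k' =>
      simp only [List.flatMap_cons, List.drop_succ_cons]
      rw [show 2 * (k' + 1) = (2 * k') + 1 + 1 by ring]
      simp [ih]

lemma pvFlat_eq_nil (ps : List (Int × Int)) :
    ps.flatMap (fun fd => [fd.1, fd.2]) = [] ↔ ps = [] := by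
  cases ps <;> simp

lemma pvChunks_flatMap (mN : Nat) (hm : 1 ≤ mN) (ps : List (Int × Int)) :
    pvChunks (2 * mN - 1) (ps.flatMap (fun fd => [fd.1, fd.2]))
    = (pvChunks (mN - 1) ps).map (fun c => c.flatMap (fun fd => [fd.1, fd.2])) := by
  induction hn : ps.length using Nat.strong_induction_on generalizing ps with
  | _ n ih =>
    match ps with
    | [] =>
      subst hn
      simp [pvChunks]
    | p :: rest =>
      subst hn
      have hflat : (p :: rest).flatMap (fun fd => [fd.1, fd.2])
          = p.1 :: p.2 :: rest.flatMap (fun fd => [fd.1, fd.2]) := by simp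
      rw [hflat, pvChunks]
      conv_rhs => rw [pvChunks]
      rw [List.map_cons]
      congr 1
      · -- heads: take (2*mN) flat = flatMap (take mN ps)
        rw [← hflat]
        have h1 : (2 * mN - 1) + 1 = 2 * mN := by omega
        have h2 : (mN - 1) + 1 = mN := by omega
        rw [h1, h2, pvFlat_take]
      · -- tails
        have h3 : (p.2 :: rest.flatMap (fun fd => [fd.1, fd.2])).drop (2 * mN - 1)
            = ((p :: rest).flatMap (fun fd => [fd.1, fd.2])).drop (2 * mN) := by
          rw [hflat]
          cases hmn : 2 * mN with
          | zero => omega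
          | succ j => simp
        have h4 : rest.drop (mN - 1) = (p :: rest).drop mN := by
          cases hmn : mN with
          | zero => omega
          | succ j => simp
        rw [h3, h4, pvFlat_drop]
        exact ih ((p :: rest).drop mN).length (by simp; omega) _ rfl
-- shared finalisation (eos append + padding) of one window, as both ports perform it
def pvFin (tl : Option Int) (pad : Int) (eos : Option Int) (seq : List Int) : List Int :=
  let seq2 := match eos with
    | some e => seq ++ [e]
    | none => seq
  match tl with
  | some L => if (seq2.length : Int) < L
              then seq2 ++ List.replicate (L - (seq2.length : Int)).toNat pad
              else seq2
  | none => seq2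

-- A's while loop, started at index i', emits one finalised window per chunk of m pairs
lemma pvALoop_eq (t : Int) (freqs durs : List Int) (tl : Option Int) (pad : Int)
    (eos : Option Int) (hl : freqs.length = durs.length) (m : Int) (hm : 0 < m) :
    ∀ (fuel : Nat) (i' : Nat) (acc : List (List Int)), freqs.length - i' < fuel →
    pvAItemLoop t freqs durs (some m) tl pad eos fuel (i' : Int) acc
    = acc ++ ((pvChunks (m.toNat - 1) ((freqs.zip durs).drop i')).map
        (fun c => pvFin tl pad eos ([t] ++ c.flatMap (fun fd => [fd.1, fd.2])))) := by
  intro fuel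
  induction fuel with
  | zero => intro i' acc h; omega
  | succ fuel ih =>
    intro i' acc h
    by_cases hi : i' < freqs.length
    · have hiI : (i' : Int) < (freqs.length : Int) := by exact_mod_cast hi
      have hmN : m = (m.toNat : Int) := by omega
      have hne : m ≠ 0 := by omega
      rw [pvAItemLoop]
      simp only [if_pos hiI, if_pos hne]
      have hend : (i' : Int) + m = ((i' + m.toNat : Nat) : Int) := by push_cast; omega
      rw [hend]
      have hsf : PySem.List.slice freqs (some (i' : Int)) (some ((i' + m.toNat : Nat) : Int))
          = (freqs.drop i').take m.toNat := by
        have := PySem.List.slice_natCast_add freqs i' m.toNat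
        rw [show ((i' : Int) + (m.toNat : Int)) = ((i' + m.toNat : Nat) : Int) by push_cast; ring] at this
        exact this
      have hsd : PySem.List.slice durs (some (i' : Int)) (some ((i' + m.toNat : Nat) : Int))
          = (durs.drop i').take m.toNat := by
        have := PySem.List.slice_natCast_add durs i' m.toNat
        rw [show ((i' : Int) + (m.toNat : Int)) = ((i' + m.toNat : Nat) : Int) by push_cast; ring] at this
        exact this
      rw [hsf, hsd]
      have hzip : ((freqs.drop i').take m.toNat).zip ((durs.drop i').take m.toNat)
          = ((freqs.zip durs).drop i').take m.toNat := by
        simp [List.zip, List.take_zipWith, List.drop_zipWith]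
      rw [hzip]
      have hfold : List.foldl (fun (s : List Int) (fd : Int × Int) => s ++ [fd.1, fd.2]) [t] (((freqs.zip durs).drop i').take m.toNat) = [t] ++ (((freqs.zip durs).drop i').take m.toNat).flatMap (fun (fd : Int × Int) => [fd.1, fd.2]) := PySem.List.foldl_append_eq_flatMap (fun (fd : Int × Int) => [fd.1, fd.2]) _ [t]
      rw [hfold]
      have hrec := ih (i' + m.toNat) (acc ++ [pvFin tl pad eos
          ([t] ++ (((freqs.zip durs).drop i').take m.toNat).flatMap (fun fd => [fd.1, fd.2]))])
          (by omega)
      simp only [pvFin] at hrec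
      -- the recursive call's accumulator and our expression must line up
      rw [show ((i' + m.toNat : Nat) : Int) = ((i' + m.toNat : Nat) : Int) from rfl]
      rw [hrec]
      -- now identify the chunk decomposition
      have hlen : ((freqs.zip durs).drop i').length = freqs.length - i' := by
        simp [List.length_zip, hl]
      obtain ⟨y, ys, hys⟩ : ∃ y ys, (freqs.zip durs).drop i' = y :: ys := by
        cases hzd : (freqs.zip durs).drop i' with
        | nil => exfalso; rw [hzd] at hlen; simp at hlen; omega
        | cons y ys => exact ⟨y, ys, rfl⟩
      have hchunk : pvChunks (m.toNat - 1) ((freqs.zip durs).drop i')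
          = (((freqs.zip durs).drop i').take m.toNat)
            :: pvChunks (m.toNat - 1) ((freqs.zip durs).drop (i' + m.toNat)) := by
        rw [hys, pvChunks]
        congr 1
        · rw [← hys]
          congr 1
          omega
        · rw [show (freqs.zip durs).drop (i' + m.toNat) = ((freqs.zip durs).drop i').drop m.toNat by
              rw [List.drop_drop, Nat.add_comm]]
          rw [hys]
          congr 1
          cases hmn : m.toNat with
          | zero => omega
          | succ j => simp
      rw [hchunk, List.map_cons]
      simp [pvFin, List.append_assoc]
    · have hiI : ¬ ((i' : Int) < (freqs.length : Int)) := by exact_mod_cast hi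
      rw [pvAItemLoop]
      simp only [if_neg hiI]
      have : (freqs.zip durs).drop i' = [] := by
        apply List.drop_eq_nil_of_le
        simp [List.length_zip, hl]
        omega
      rw [this]
      simp [pvChunks]
-- A's loop when target_length is None: one window holding the whole item
lemma pvALoop_none_eq (t : Int) (freqs durs : List Int) (pad : Int) (eos : Option Int)
    (hl : freqs.length = durs.length) (acc : List (List Int)) :
    pvAItemLoop t freqs durs none none pad eos (freqs.length + 1) 0 acc
    = acc ++ (if freqs.zip durs ≠ [] then
        [pvFin none pad eos ([t] ++ (freqs.zip durs).flatMap (fun (fd : Int × Int) => [fd.1, fd.2]))]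
      else []) := by
  cases freqs with
  | nil =>
    rw [pvAItemLoop]
    simp
  | cons a l =>
    rw [pvAItemLoop]
    have hpos : (0 : Int) < (((a :: l).length : Nat) : Int) := by
      exact_mod_cast Nat.succ_pos l.length
    rw [if_pos hpos]
    have hsf : PySem.List.slice (a :: l) (some (0 : Int)) (some (((a :: l).length : Nat) : Int))
        = a :: l := by
      rw [PySem.List.slice_zero_start, PySem.List.slice_to_natCast, List.take_length]
    have hsd : PySem.List.slice durs (some (0 : Int)) (some (((a :: l).length : Nat) : Int))
        = durs := by
      rw [PySem.List.slice_zero_start, PySem.List.slice_to_natCast, hl, List.take_length]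
    simp only [hsf, hsd]
    rw [show (a :: l).length = l.length + 1 from rfl]
    rw [pvAItemLoop]
    have hstop : ¬ (((l.length + 1 : Nat) : Int) < (((a :: l).length : Nat) : Int)) := by
      simp
    rw [if_neg hstop]
    have hfold : List.foldl (fun (s : List Int) (fd : Int × Int) => s ++ [fd.1, fd.2]) [t] ((a :: l).zip durs)
        = [t] ++ ((a :: l).zip durs).flatMap (fun (fd : Int × Int) => [fd.1, fd.2]) :=
      PySem.List.foldl_append_eq_flatMap (fun (fd : Int × Int) => [fd.1, fd.2]) _ [t]
    rw [hfold]
    have hne : (a :: l).zip durs ≠ [] := by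
      cases durs with
      | nil => simp at hl
      | cons b r => simp
    rw [if_pos hne]
    simp [pvFin]

-- the per-item equality, target_length = None: A's windowing = B's interleave-and-slice
lemma pvItem_none_eq (t : Int) (freqs durs : List Int) (pad : Int) (eos : Option Int)
    (hl : freqs.length = durs.length) (acc : List (List Int)) :
    pvAItemLoop t freqs durs none none pad eos (freqs.length + 1) 0 acc
    = (if (freqs.zip durs).flatMap (fun (fd : Int × Int) => [fd.1, fd.2]) ≠ [] then
        [(freqs.zip durs).flatMap (fun (fd : Int × Int) => [fd.1, fd.2])]
      else []).foldl
        (fun out chunk => out ++ [pvFin none pad eos ([t] ++ chunk)]) acc := by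
  rw [pvALoop_none_eq t freqs durs pad eos hl acc]
  by_cases hne : (freqs.zip durs).flatMap (fun (fd : Int × Int) => [fd.1, fd.2]) = []
  · have hz : freqs.zip durs = [] := (pvFlat_eq_nil _).mp hne
    simp [hz]
  · have hz : freqs.zip durs ≠ [] := fun h => hne (by simp [h])
    rw [if_pos hz, if_pos hne]
    simp only [List.foldl_cons, List.foldl_nil]

-- the per-item equality, target_length = L ≥ 4
lemma pvItem_some_eq (t : Int) (freqs durs : List Int) (L : Int) (pad : Int)
    (eos : Option Int) (hl : freqs.length = durs.length) (hL : 4 ≤ L)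
    (acc : List (List Int)) :
    pvAItemLoop t freqs durs (some (PySem.Int.floordiv (L - 2) 2)) (some L) pad eos
      (freqs.length + 1) 0 acc
    = ((PySem.List.pyRange 0
          ((((freqs.zip durs).flatMap (fun (fd : Int × Int) => [fd.1, fd.2])).length : Int))
          (2 * PySem.Int.floordiv (L - 2) 2)).map
          (fun j => PySem.List.slice
            ((freqs.zip durs).flatMap (fun (fd : Int × Int) => [fd.1, fd.2]))
            (some j) (some (j + 2 * PySem.Int.floordiv (L - 2) 2)))).foldl
        (fun out chunk => out ++ [pvFin (some L) pad eos ([t] ++ chunk)]) acc := by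
  have hfd : PySem.Int.floordiv (L - 2) 2 = (L - 2) / 2 :=
    PySem.Int.floordiv_eq_ediv_of_pos (by omega)
  have hmpos : 0 < PySem.Int.floordiv (L - 2) 2 := by
    rw [hfd]; omega
  set m : Int := PySem.Int.floordiv (L - 2) 2 with hm
  set W : Nat := 2 * m.toNat with hW
  have hWpos : 0 < W := by rw [hW]; omega
  have hwc : 2 * m = ((W : Nat) : Int) := by rw [hW]; push_cast; omega
  rw [PySem.List.foldl_append_singleton_eq_map]
  have hloop := pvALoop_eq t freqs durs (some L) pad eos hl m hmpos (freqs.length + 1) 0 acc (by omega)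
  norm_num at hloop
  rw [hloop]
  congr 1
  rw [hwc, pvWindows_eq_chunks W hWpos]
  rw [show W - 1 = 2 * m.toNat - 1 from rfl]
  rw [pvChunks_flatMap m.toNat (by omega)]
  rw [List.map_map]
  rfl
-- ===== VERDICT (by name: the statement is the Claim_ definition above) =====
theorem build_token_sequences_spec : Claim_equal_build_token_sequences := by
  intro type_tokens freq_tokens dur_tokens target_length pad_token eos_token _hdom hpre
  obtain ⟨h1, h2, h3, h4⟩ := hpre
  unfold Spec_build_token_sequences build_token_sequences build_token_sequences_alt
  by_cases hft : freq_tokens = []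
  · subst hft
    simp
  · have htl : 4 ≤ target_length.getD 4 := h4.resolve_left hft
    apply PySem.List.foldl_congr_mem
    intro acc it hmem
    obtain ⟨t, freqs, durs⟩ := it
    have hfd : (freqs, durs) ∈ freq_tokens.zip dur_tokens := (List.of_mem_zip hmem).2
    have hl : freqs.length = durs.length := by
      have := (List.all_eq_true.mp h3) _ hfd
      simpa using this
    cases target_length with
    | none => exact pvItem_none_eq t freqs durs pad_token eos_token hl acc
    | some L =>
      have hL : 4 ≤ L := by simpa using htl
      exact pvItem_some_eq t freqs durs L pad_token eos_token hl hL acc
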